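-- pv_equiv track=rewrite | github.com/EddieIvan01/flask-bbs | blob/utils/escape.py | flask_real_escape
-- ===== SOURCE A (Python) =====
-- def flask_real_escape(s):
--
--     """
--     * This function is use to defence
--     * NoSQL injection
--     """
--
--     if not s:
--         return s, False
--     sqli_flag = False
--     words = [
--         "$lt", "$lte", "$gt", "$gte", "$ne", "$eq", "$type", "$in", "$nin", "$or", "$and", "$not", "$nor", "$exists", "$mod",
--         "$regex", "$text", "$where", "$all", "$elemMatch", "$size", "$inc", "$mul", "$rename", "$setOnInsert", "$set", "$unset",
--         "$min", "$max", "$addToSet", "$pop", "$pull", "$each", "$sort", "$position", "})", "))", ");", "};", "//"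
--     ]
--     for i in words:
--         if i in s:
--             sqli_flag = True
--             return "", sqli_flag
--     s = s.replace("}", r"\}")
--     s = s.replace("]", r"\]")
--     s = s.replace("[", r"\[")
--     s = s.replace("{", r"\{")
--     s = s.replace("'", r"\'")
--     s = s.replace("$", r"\$")
--     s = s.replace("/", r"\/")
--     s = s.replace("(", r"\(")
--     s = s.replace(")", r"\)")
--     s = s.replace("=", r"\=")
--     s = s.replace(";", r"\;")
--     return s, sqli_flag
-- ===== SOURCE B (Python) =====
-- def flask_real_escape(s):
--     if not s:
--         return s, False
--     words = [
--         "$lt", "$lte", "$gt", "$gte", "$ne", "$eq", "$type", "$in", "$nin", "$or", "$and", "$not", "$nor", "$exists", "$mod",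
--         "$regex", "$text", "$where", "$all", "$elemMatch", "$size", "$inc", "$mul", "$rename", "$setOnInsert", "$set", "$unset",
--         "$min", "$max", "$addToSet", "$pop", "$pull", "$each", "$sort", "$position", "})", "))", ");", "};", "//"
--     ]
--     if any(w in s for w in words):
--         return "", True
--     table = str.maketrans({c: "\\" + c for c in "}][{'$/()=;"})
--     return s.translate(table), False
-- ===== Notes on version B (the rewrite author's own statement) =====
-- stated objective: simpler
-- what changed: The 11 sequential full-string .replace passes are replaced by one str.translate over a maketrans table (a single pass mapping each special character to its backslash-escaped form), and the explicit flag-setting loop by an any() generator.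
import Mathlib
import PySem

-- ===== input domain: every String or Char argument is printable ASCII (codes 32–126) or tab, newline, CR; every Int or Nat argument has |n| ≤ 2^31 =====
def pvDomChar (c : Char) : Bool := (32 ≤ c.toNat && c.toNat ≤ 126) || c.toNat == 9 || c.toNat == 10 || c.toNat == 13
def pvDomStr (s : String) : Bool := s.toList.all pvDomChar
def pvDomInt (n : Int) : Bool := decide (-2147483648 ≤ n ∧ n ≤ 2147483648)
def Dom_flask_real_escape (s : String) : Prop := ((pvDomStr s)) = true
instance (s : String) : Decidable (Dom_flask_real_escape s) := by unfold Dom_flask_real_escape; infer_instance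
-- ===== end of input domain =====

-- B replaces A's 11 sequential full-string replace passes with one table-driven
-- single pass over the characters (str.translate), and the flag loop with any(): simpler.


-- ===== PORT A =====
def pvWordsA : List String := [
  "$lt", "$lte", "$gt", "$gte", "$ne", "$eq", "$type", "$in", "$nin", "$or", "$and", "$not", "$nor", "$exists", "$mod",
  "$regex", "$text", "$where", "$all", "$elemMatch", "$size", "$inc", "$mul", "$rename", "$setOnInsert", "$set", "$unset",
  "$min", "$max", "$addToSet", "$pop", "$pull", "$each", "$sort", "$position", "})", "))", ");", "};", "//"]

-- the 11 sequential s = s.replace(...) statements after the loop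
def pvReplacesA (s : String) : String :=
  let s := PySem.Str.replace s "}" "\\}"
  let s := PySem.Str.replace s "]" "\\]"
  let s := PySem.Str.replace s "[" "\\["
  let s := PySem.Str.replace s "{" "\\{"
  let s := PySem.Str.replace s "'" "\\'"
  let s := PySem.Str.replace s "$" "\\$"
  let s := PySem.Str.replace s "/" "\\/"
  let s := PySem.Str.replace s "(" "\\("
  let s := PySem.Str.replace s ")" "\\)"
  let s := PySem.Str.replace s "=" "\\="
  let s := PySem.Str.replace s ";" "\\;"
  s

-- the 'for i in words' loop with its early return; falls through to the replaces
def pvLoopA : List String → String → String × Bool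
  | [], s => (pvReplacesA s, false)
  | i :: rest, s => if PySem.Str.isIn i s then ("", true) else pvLoopA rest s

def flask_real_escape (s : String) : String × Bool :=
  if s.toList.isEmpty then (s, false)
  else pvLoopA pvWordsA s

-- ===== PORT B =====
def pvWordsB : List String := [
  "$lt", "$lte", "$gt", "$gte", "$ne", "$eq", "$type", "$in", "$nin", "$or", "$and", "$not", "$nor", "$exists", "$mod",
  "$regex", "$text", "$where", "$all", "$elemMatch", "$size", "$inc", "$mul", "$rename", "$setOnInsert", "$set", "$unset",
  "$min", "$max", "$addToSet", "$pop", "$pull", "$each", "$sort", "$position", "})", "))", ");", "};", "//"]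

-- the maketrans table lookup: chars in the table map to "\" + c, others to themselves
def pvEscTable (c : Char) : List Char :=
  if c ∈ ['}', ']', '[', '{', '\'', '$', '/', '(', ')', '=', ';'] then ['\\', c] else [c]

def flask_real_escape_alt (s : String) : String × Bool :=
  if s.toList.isEmpty then (s, false)
  else if pvWordsB.any (fun w => PySem.Str.isIn w s) then ("", true)
  else (String.ofList (s.toList.flatMap pvEscTable), false)

-- ===== PRECONDITION & SPEC =====
def Spec_flask_real_escape (s : String) (out : String × Bool) : Prop := out = flask_real_escape_alt s
instance (s : String) (out : String × Bool) : Decidable (Spec_flask_real_escape s out) := by unfold Spec_flask_real_escape; infer_instance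

-- ===== CLAIM (what is proved, stated in full; the proofs are below) =====
def Claim_equal_flask_real_escape : Prop := ∀ (s : String), Dom_flask_real_escape s → Spec_flask_real_escape s (flask_real_escape s)

-- ===== LEMMAS AND PROOFS =====

-- single-char replace at the character-list level is a flatMap
lemma go_single (t : Char) (r : List Char) :
    ∀ (cs : List Char) (fuel : Nat) (acc : List Char), cs.length ≤ fuel →
      PySem.Chars.replace.go [t] r fuel cs acc
        = acc.reverse ++ cs.flatMap (fun c => if c = t then r else [c]) := by
  intro cs
  induction cs with
  | nil => intro fuel acc h; cases fuel <;> simp [PySem.Chars.replace.go]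
  | cons c cs ih =>
    intro fuel acc h
    cases fuel with
    | zero => simp at h
    | succ n =>
      simp only [PySem.Chars.replace.go]
      by_cases hc : t = c
      · subst hc
        simp [List.isPrefixOf, ih n _ (by simpa using h)]
      · simp [List.isPrefixOf, hc, Ne.symm hc, ih n _ (by simpa using h)]

lemma replace_single (cs : List Char) (t : Char) (r : List Char) :
    PySem.Chars.replace cs [t] r = cs.flatMap (fun c => if c = t then r else [c]) := by
  simpa [PySem.Chars.replace] using go_single t r cs cs.length [] le_rfl

-- escaping with respect to a list of targets S
def escW (S : List Char) (c : Char) : List Char := if c ∈ S then ['\\', c] else [c]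

lemma flatMap_escW_nil (cs : List Char) : cs.flatMap (escW []) = cs := by
  induction cs with
  | nil => rfl
  | cons c cs ih => simp [escW, ih]

lemma escW_step (S : List Char) (t : Char) (ht : t ≠ '\\') (hS : t ∉ S) (c : Char) :
    (escW S c).flatMap (fun c' => if c' = t then ['\\', t] else [c']) = escW (S ++ [t]) c := by
  by_cases hc : c ∈ S
  · have hct : c ≠ t := fun h => hS (h ▸ hc)
    simp [escW, hc, Ne.symm ht, hct]
  · by_cases hct : c = t
    · subst hct; simp [escW, hc]
    · simp [escW, hc, hct]

lemma flatMap_flatMap' (f g : Char → List Char) (cs : List Char) :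
    (cs.flatMap f).flatMap g = cs.flatMap (fun c => (f c).flatMap g) := by
  induction cs with
  | nil => rfl
  | cons c cs ih => simp [List.flatMap_cons, List.flatMap_append, ih]

lemma step (cs S : List Char) (t : Char) (ht : t ≠ '\\') (hS : t ∉ S) :
    PySem.Chars.replace (cs.flatMap (escW S)) [t] ['\\', t] = cs.flatMap (escW (S ++ [t])) := by
  rw [replace_single, flatMap_flatMap']
  exact congrArg cs.flatMap (funext (escW_step S t ht hS))

lemma replacesA_eq (s : String) :
    pvReplacesA s = String.ofList (s.toList.flatMap pvEscTable) := by
  apply String.toList_inj.mp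
  show (pvReplacesA s).toList = (String.ofList (s.toList.flatMap pvEscTable)).toList
  rw [String.toList_ofList]
  simp only [pvReplacesA, PySem.Str.toList_replace]
  rw [show ∀ cs, PySem.Chars.replace cs ("}" : String).toList ("\\}" : String).toList
        = PySem.Chars.replace cs ['}'] ['\\', '}'] from fun _ => rfl]
  conv_lhs => rw [← flatMap_escW_nil s.toList]
  rw [step _ _ _ (by decide) (by decide)]
  rw [show (("]" : String).toList) = [']'] from rfl, show (("\\]" : String).toList) = ['\\', ']'] from rfl,
      step _ _ _ (by decide) (by decide)]
  rw [show (("[" : String).toList) = ['['] from rfl, show (("\\[" : String).toList) = ['\\', '['] from rfl,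
      step _ _ _ (by decide) (by decide)]
  rw [show (("{" : String).toList) = ['{'] from rfl, show (("\\{" : String).toList) = ['\\', '{'] from rfl,
      step _ _ _ (by decide) (by decide)]
  rw [show (("'" : String).toList) = ['\''] from rfl, show (("\\'" : String).toList) = ['\\', '\''] from rfl,
      step _ _ _ (by decide) (by decide)]
  rw [show (("$" : String).toList) = ['$'] from rfl, show (("\\$" : String).toList) = ['\\', '$'] from rfl,
      step _ _ _ (by decide) (by decide)]
  rw [show (("/" : String).toList) = ['/'] from rfl, show (("\\/" : String).toList) = ['\\', '/'] from rfl,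
      step _ _ _ (by decide) (by decide)]
  rw [show (("(" : String).toList) = ['('] from rfl, show (("\\(" : String).toList) = ['\\', '('] from rfl,
      step _ _ _ (by decide) (by decide)]
  rw [show ((")" : String).toList) = [')'] from rfl, show (("\\)" : String).toList) = ['\\', ')'] from rfl,
      step _ _ _ (by decide) (by decide)]
  rw [show (("=" : String).toList) = ['='] from rfl, show (("\\=" : String).toList) = ['\\', '='] from rfl,
      step _ _ _ (by decide) (by decide)]
  rw [show ((";" : String).toList) = [';'] from rfl, show (("\\;" : String).toList) = ['\\', ';'] from rfl,
      step _ _ _ (by decide) (by decide)]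
  rfl

lemma loopA_eq (ws : List String) (s : String) :
    pvLoopA ws s
      = if ws.any (fun w => PySem.Str.isIn w s) then ("", true) else (pvReplacesA s, false) := by
  induction ws with
  | nil => simp [pvLoopA]
  | cons w ws ih =>
    rw [show pvLoopA (w :: ws) s
          = if PySem.Str.isIn w s then ("", true) else pvLoopA ws s from rfl,
        List.any_cons]
    cases hb : PySem.Str.isIn w s <;> simp [ih]

-- ===== VERDICT (by name: the statement is the Claim_ definition above) =====
theorem flask_real_escape_spec : Claim_equal_flask_real_escape := by
  intro s _
  show flask_real_escape s = flask_real_escape_alt s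
  unfold flask_real_escape flask_real_escape_alt
  rw [loopA_eq, show pvWordsA = pvWordsB from rfl]
  split_ifs with h1 h2
  · rfl
  · rfl
  · rw [replacesA_eq]
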